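-- pv_equiv track=rewrite | github.com/sharathkumar49/learning | Python programs/pythonPrograms/smart_parcel_sorting.py | min_parcel_groups
-- ===== SOURCE A (Python) =====
-- from bisect import bisect_right
--
-- def min_parcel_groups(parcels, max_weight):
-- 	# parcels.sort(reverse=True)
-- 	parcels.sort()
-- 	groups = 0
-- 	while parcels:
-- 		current = parcels.pop(0)
-- 		index = bisect_right(parcels, max_weight - current)
-- 		if index > 0:
-- 			parcels.pop(index - 1)
-- 		groups += 1
-- 	return groups
-- ===== SOURCE B (Python) =====
-- def min_parcel_groups(parcels, max_weight):
--     s = sorted(parcels)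
--     i = 0
--     j = len(s) - 1
--     pairs = 0
--     while i < j:
--         if s[i] + s[j] <= max_weight:
--             pairs += 1
--             i += 1
--         j -= 1
--     return len(s) - pairs
-- ===== Notes on version B (the rewrite author's own statement) =====
-- stated objective: faster
-- what changed: A repeatedly pops the smallest parcel and bisects/pops its best partner from a shrinking list (quadratic in list operations); B sorts once and does a single two-pointer pass over the sorted list, counting fitting pairs and returning n - pairs.
import Mathlib
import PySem

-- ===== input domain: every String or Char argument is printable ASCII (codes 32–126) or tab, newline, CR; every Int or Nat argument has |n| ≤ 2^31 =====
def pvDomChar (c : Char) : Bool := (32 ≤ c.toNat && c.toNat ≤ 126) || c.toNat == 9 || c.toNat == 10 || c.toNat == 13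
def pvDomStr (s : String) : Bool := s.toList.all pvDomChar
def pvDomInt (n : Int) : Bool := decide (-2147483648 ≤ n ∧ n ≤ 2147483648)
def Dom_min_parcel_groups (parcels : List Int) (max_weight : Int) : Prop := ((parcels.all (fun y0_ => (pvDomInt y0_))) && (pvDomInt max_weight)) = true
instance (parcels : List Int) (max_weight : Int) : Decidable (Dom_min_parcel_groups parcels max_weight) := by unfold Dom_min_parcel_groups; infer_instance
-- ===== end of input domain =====

-- B replaces A's quadratic pop(0)/bisect/pop loop by one two-pointer pass over the sorted
-- list, counting pairs and returning n - pairs (return value only: the Python A empties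
-- its argument list in place, B leaves it untouched).

-- ===== PORT A =====
-- while parcels: current = parcels.pop(0); index = bisect_right(parcels, max_weight-current);
-- if index > 0: parcels.pop(index-1); groups += 1
-- (pop(index-1) is in range whenever index > 0, so it is ported as eraseIdx (index-1))
def aLoop (max_weight : Int) : List Int → Int → Int
  | [], groups => groups
  | current :: rest, groups =>
      let index := PySem.List.bisectRight rest (max_weight - current)
      if 0 < index then
        aLoop max_weight (rest.eraseIdx (index - 1)) (groups + 1)
      else
        aLoop max_weight rest (groups + 1)
termination_by l _ => l.length
decreasing_by
  · simp only [List.length_cons, List.length_eraseIdx]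
    split <;> omega
  · simp only [List.length_cons]; omega

def min_parcel_groups (parcels : List Int) (max_weight : Int) : Int :=
  aLoop max_weight (PySem.List.sorted parcels (fun x => x) false) 0

-- ===== PORT B =====
-- the i/j two-pointer while loop of Source B; 0 ≤ i < j < len s whenever s is indexed, so
-- s[i], s[j] are ported as getD
def bLoop (s : List Int) (max_weight : Int) (i j : Nat) (pairs : Int) : Int :=
  if i < j then
    if s.getD i 0 + s.getD j 0 ≤ max_weight then
      bLoop s max_weight (i + 1) (j - 1) (pairs + 1)
    else
      bLoop s max_weight i (j - 1) pairs
  else pairs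
termination_by j - i
decreasing_by all_goals omega

def min_parcel_groups_alt (parcels : List Int) (max_weight : Int) : Int :=
  let s := PySem.List.sorted parcels (fun x => x) false
  (s.length : Int) - bLoop s max_weight 0 (s.length - 1) 0

-- ===== PRECONDITION & SPEC =====
def Spec_min_parcel_groups (parcels : List Int) (max_weight : Int) (out : Int) : Prop := out = min_parcel_groups_alt parcels max_weight
instance (parcels : List Int) (max_weight : Int) (out : Int) : Decidable (Spec_min_parcel_groups parcels max_weight out) := by unfold Spec_min_parcel_groups; infer_instance

-- ===== CLAIM (what is proved, stated in full; the proofs are below) =====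
def Claim_equal_min_parcel_groups : Prop := ∀ (parcels : List Int) (max_weight : Int), Dom_min_parcel_groups parcels max_weight → Spec_min_parcel_groups parcels max_weight (min_parcel_groups parcels max_weight)

-- ===== LEMMAS AND PROOFS =====

-- the list-structural two-pointer pair count both loops are reduced to
def tp (W : Int) : List Int → Int
  | [] => 0
  | [_] => 0
  | x :: y :: rest =>
      if x + (y :: rest).getLastD 0 ≤ W then 1 + tp W ((y :: rest).dropLast)
      else tp W (x :: (y :: rest).dropLast)
termination_by l => l.length
decreasing_by all_goals simp [List.length_dropLast]

theorem tp_short (W : Int) (l : List Int) (h : l.length ≤ 1) : tp W l = 0 := by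
  match l with
  | [] => simp [tp]
  | [x] => simp [tp]
  | x :: y :: r => simp at h

theorem tp_eq (W : Int) (l : List Int) (h : 2 ≤ l.length) :
    tp W l = if l.getD 0 0 + l.getLastD 0 ≤ W then 1 + tp W l.tail.dropLast
             else tp W l.dropLast := by
  match l with
  | x :: y :: rest => simp [tp]

theorem tp_cons_fit (W x : Int) (t : List Int) (ht : t ≠ []) (h : x + t.getLastD 0 ≤ W) :
    tp W (x :: t) = 1 + tp W t.dropLast := by
  match t with
  | a :: t2 => simp only [tp]; rw [if_pos h]

theorem getLastD_cons_mem (y d : Int) (rest : List Int) : (y :: rest).getLastD d ∈ y :: rest := by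
  rw [List.getLastD_eq_getLast?, List.getLast?_eq_some_getLast (by simp)]
  simp [List.getLast_mem]

-- in a sorted list whose first two elements already exceed W, no pair fits
theorem tp_zero (W : Int) :
    ∀ (n : Nat) (x y : Int) (rest : List Int), rest.length ≤ n →
      (x :: y :: rest).Pairwise (· ≤ ·) → W < x + y → tp W (x :: y :: rest) = 0 := by
  intro n
  induction n with
  | zero =>
    intro x y rest hlen hpw hxy
    have : rest = [] := by cases rest <;> simp_all
    subst this
    simp [tp]
    omega
  | succ n ih =>
    intro x y rest hlen hpw hxy
    have hy : y ≤ (y :: rest).getLastD 0 := by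
      rcases List.mem_cons.mp (getLastD_cons_mem y 0 rest) with h | h
      · omega
      · exact (List.pairwise_cons.mp (List.pairwise_cons.mp hpw).2).1 _ h
    rw [tp, if_neg (by omega)]
    cases rest with
    | nil => simp [tp]
    | cons r rs =>
      rw [List.dropLast_cons₂]
      exact ih x y _ (by simp [List.length_dropLast] at hlen ⊢; omega)
        (hpw.sublist ((List.dropLast_sublist _).cons₂ y |>.cons₂ x)) hxy

-- a sorted tail none of whose elements fits with the head is ignored by the two-pointer scan
theorem tp_append_big (W : Int) :
    ∀ (n : Nat) (x : Int) (u v : List Int), v.length ≤ n →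
      ((x :: u) ++ v).Pairwise (· ≤ ·) → (∀ b ∈ v, W < x + b) →
      tp W ((x :: u) ++ v) = tp W (x :: u) := by
  intro n
  induction n with
  | zero =>
    intro x u v hlen hpw hv
    have : v = [] := by cases v <;> simp_all
    subst this; simp
  | succ n ih =>
    intro x u v hlen hpw hv
    rcases v.eq_nil_or_concat with rfl | ⟨v', b, rfl⟩
    · simp
    have hassoc : (x :: u) ++ v'.concat b = ((x :: u) ++ v') ++ [b] := by simp
    rw [hassoc, tp_eq W _ (by simp; omega)]
    have hb : W < x + b := hv b (by simp)
    have hget : (((x :: u) ++ v') ++ [b]).getD 0 0 = x := by simp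
    have hlast : (((x :: u) ++ v') ++ [b]).getLastD 0 = b := by
      rw [List.getLastD_eq_getLast?, List.getLast?_concat]; rfl
    rw [hget, hlast, if_neg (by omega), List.dropLast_concat]
    exact ih x u v' (by simp at hlen ⊢; omega)
      (hpw.sublist (by simpa using List.sublist_append_left ((x :: u) ++ v') [b]))
      (fun c hc => hv c (by simp [hc]))

-- A's greedy loop on a sorted list returns g + n - (two-pointer pair count)
theorem aLoop_eq (W : Int) :
    ∀ (n : Nat) (s : List Int) (g : Int), s.length ≤ n → s.Pairwise (· ≤ ·) →
      aLoop W s g = g + s.length - tp W s := by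
  intro n
  induction n with
  | zero =>
    intro s g hlen hpw
    have : s = [] := by cases s <;> simp_all
    subst this; simp [aLoop, tp]
  | succ n ih =>
    intro s g hlen hpw
    cases s with
    | nil => simp [aLoop, tp]
    | cons x rest =>
      have hx : ∀ b ∈ rest, x ≤ b := (List.pairwise_cons.mp hpw).1
      have hpw' : rest.Pairwise (· ≤ ·) := (List.pairwise_cons.mp hpw).2
      obtain ⟨hk_le, hk_lt, hk_gt⟩ := PySem.List.bisectRight_spec rest (W - x) hpw'
      set k := PySem.List.bisectRight rest (W - x) with hkdef
      simp only [aLoop]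
      by_cases hkpos : 0 < k
      · rw [if_pos hkpos]
        have hrest_ne : rest ≠ [] := by
          intro h; subst h; simp at hk_le; omega
        have hlen_pos : 0 < rest.length := List.length_pos_of_ne_nil hrest_ne
        have hlen_er : (rest.eraseIdx (k-1)).length = rest.length - 1 := by
          rw [List.length_eraseIdx]; simp [show k - 1 < rest.length by omega]
        have hpw_er : (rest.eraseIdx (k-1)).Pairwise (· ≤ ·) :=
          hpw'.sublist (List.eraseIdx_sublist rest (k-1))
        rw [ih _ (g+1) (by rw [hlen_er]; simp only [List.length_cons] at hlen; omega) hpw_er]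
        have herase : rest.eraseIdx (k-1) = rest.take (k-1) ++ rest.drop k := by
          rw [List.eraseIdx_eq_take_drop_succ]
          have : k - 1 + 1 = k := by omega
          rw [this]
        have hd : ∀ b ∈ rest.drop k, W - x < b := by
          intro b hb
          obtain ⟨i, hi, hbi⟩ := List.mem_iff_getElem.mp hb
          have hik : k + i < rest.length := by
            have := List.length_drop (i := k) (l := rest); omega
          have : (rest.drop k)[i] = rest[k + i] := by
            rw [List.getElem_drop]
          rw [this] at hbi
          have := hk_gt (k+i) hik (by omega)
          omega
        have htlen : (rest.take k).length = k := by simp; omega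
        have ht_ne : rest.take k ≠ [] := by
          intro h; rw [h] at htlen; simp at htlen; omega
        have step1 : tp W (x :: rest) = tp W (x :: rest.take k) := by
          have hsplit : x :: rest = (x :: rest.take k) ++ rest.drop k := by
            simp [List.take_append_drop]
          rw [hsplit]
          exact tp_append_big W (rest.drop k).length x (rest.take k) (rest.drop k) le_rfl
            (by rw [← hsplit]; exact hpw) (fun b hb => by have := hd b hb; omega)
        have hlastt : (rest.take k).getLastD 0 = rest[k-1]'(by omega) := by
          rw [List.getLastD_eq_getLast?, List.getLast?_eq_getElem?, htlen]
          rw [List.getElem?_take]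
          simp [show k - 1 < k by omega, List.getElem?_eq_getElem (show k-1 < rest.length by omega)]
        have step2 : tp W (x :: rest.take k) = 1 + tp W (rest.take k).dropLast := by
          apply tp_cons_fit W x _ ht_ne
          rw [hlastt]
          have := hk_lt (k-1) (by omega) (by omega)
          omega
        have step3 : (rest.take k).dropLast = rest.take (k-1) := by
          rw [List.dropLast_eq_take, htlen, List.take_take]
          congr 1
          omega
        have step4 : tp W (rest.eraseIdx (k-1)) = tp W (rest.take (k-1)) := by
          rw [herase]
          cases hk1 : rest.take (k-1) with
          | nil =>
            simp only [List.nil_append]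
            rw [show tp W ([] : List Int) = 0 by simp [tp]]
            cases hdq : rest.drop k with
            | nil => simp [tp]
            | cons a d' =>
              cases d' with
              | nil => simp [tp]
              | cons b d'' =>
                apply tp_zero W d''.length a b d'' le_rfl
                · rw [← hdq]; exact hpw'.sublist (List.drop_sublist _ _)
                · have hax : x ≤ a := hx a (List.mem_of_mem_drop (by rw [hdq]; simp))
                  have hbd : W - x < b := hd b (by rw [hdq]; simp)
                  omega
          | cons h t' =>
            have hpw_er2 : ((h :: t') ++ rest.drop k).Pairwise (· ≤ ·) := by
              rw [← hk1, ← herase]; exact hpw_er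
            apply tp_append_big W (rest.drop k).length h t' (rest.drop k) le_rfl hpw_er2
            intro b hb
            have hhx : x ≤ h := hx h (List.mem_of_mem_take (by rw [hk1]; simp))
            have := hd b hb
            omega
        rw [step1, step2, step3, ← step4]
        simp only [List.length_cons]
        rw [hlen_er]
        push_cast [Nat.cast_sub (by omega : 1 ≤ rest.length)]
        ring
      · rw [if_neg hkpos]
        have hk0 : k = 0 := by omega
        rw [ih rest (g+1) (by simp at hlen; omega) hpw']
        have htp2 : tp W rest = 0 := by
          cases rest with
          | nil => simp [tp]
          | cons y r =>
            cases r with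
            | nil => simp [tp]
            | cons z r' =>
              have hy : W - x < y := by have := hk_gt 0 (by simp) (by omega); simpa using this
              have hxz : x ≤ z := hx z (by simp)
              exact tp_zero W r'.length y z r' le_rfl hpw' (by omega)
        have htp1 : tp W (x :: rest) = 0 := by
          cases rest with
          | nil => simp [tp]
          | cons y r =>
            have hy : W - x < y := by have := hk_gt 0 (by simp) (by omega); simpa using this
            exact tp_zero W r.length x y r le_rfl hpw (by omega)
        rw [htp1, htp2]
        simp only [List.length_cons]
        push_cast
        ring

theorem dropLast_drop_take (s : List Int) (i m : Nat) (h : m ≤ s.length) :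
    ((s.take m).drop i).dropLast = (s.take (m-1)).drop i := by
  rcases Nat.lt_or_ge i m with hi | hi
  · rw [List.dropLast_eq_take]
    simp only [List.length_drop, List.length_take, List.take_drop, List.take_take]
    have : min (i + (min m s.length - i - 1)) m = m - 1 := by omega
    rw [this]
  · rw [List.drop_eq_nil_of_le (by simp; omega), List.drop_eq_nil_of_le (by simp; omega)]
    simp

-- B's index loop computes the two-pointer pair count of the window s[i..j]
theorem bLoop_eq (s : List Int) (W : Int) :
    ∀ (d i j : Nat) (p : Int), j - i ≤ d → j < s.length →
      bLoop s W i j p = p + tp W ((s.take (j+1)).drop i) := by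
  intro d
  induction d with
  | zero =>
    intro i j p hd hj
    rw [bLoop, if_neg (by omega)]
    rw [tp_short W _ (by simp; omega)]
    ring
  | succ d ih =>
    intro i j p hd hj
    rw [bLoop]
    by_cases hij : i < j
    · rw [if_pos hij]
      have hw2 : 2 ≤ ((s.take (j+1)).drop i).length := by simp; omega
      have hwl : ((s.take (j+1)).drop i).length = j+1-i := by simp; omega
      have hgi : ((s.take (j+1)).drop i).getD 0 0 = s.getD i 0 := by
        rw [List.getD_eq_getElem?_getD, List.getElem?_drop]
        simp [show i < j + 1 by omega, List.getD_eq_getElem?_getD]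
      have hgl : ((s.take (j+1)).drop i).getLastD 0 = s.getD j 0 := by
        rw [List.getLastD_eq_getLast?, List.getLast?_eq_getElem?, hwl,
          show j+1-i-1 = j-i by omega, List.getElem?_drop, show i+(j-i) = j by omega,
          List.getElem?_take]
        simp [show j < j+1 by omega, List.getD_eq_getElem?_getD]
      rw [tp_eq W _ hw2, hgi, hgl]
      split_ifs with hfit
      · rw [ih (i+1) (j-1) (p+1) (by omega) (by omega)]
        rw [List.tail_drop, show (j-1)+1 = j by omega]
        rw [dropLast_drop_take s (i+1) (j+1) (by omega)]
        rw [show j+1-1 = j by omega]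
        ring
      · rw [ih i (j-1) p (by omega) (by omega)]
        rw [show (j-1)+1 = j by omega]
        rw [dropLast_drop_take s i (j+1) (by omega)]
        rw [show j+1-1 = j by omega]
    · rw [if_neg hij]
      rw [tp_short W _ (by simp; omega)]
      ring

-- ===== VERDICT (by name: the statement is the Claim_ definition above) =====
theorem min_parcel_groups_spec : Claim_equal_min_parcel_groups := by
  intro parcels W _
  unfold Spec_min_parcel_groups min_parcel_groups min_parcel_groups_alt
  set S := PySem.List.sorted parcels (fun x => x) false with hS
  have hpw : S.Pairwise (· ≤ ·) := by
    simpa using PySem.List.sorted_pairwise parcels (fun x => x)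
  show aLoop W S 0 = (S.length : Int) - bLoop S W 0 (S.length - 1) 0
  rcases Nat.eq_zero_or_pos S.length with h0 | hpos
  · have hnil : S = [] := List.eq_nil_of_length_eq_zero h0
    rw [hnil]
    rw [show bLoop [] W 0 (List.length ([] : List Int) - 1) 0 = 0 by rw [bLoop]; simp]
    simp [aLoop]
  · rw [aLoop_eq W S.length S 0 le_rfl hpw]
    rw [bLoop_eq S W (S.length - 1) 0 (S.length - 1) 0 le_rfl (by omega)]
    rw [show S.length - 1 + 1 = S.length by omega, List.take_length, List.drop_zero]
    ring
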